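-- pv_equiv track=rewrite | github.com/mohit2152sharma/programming-problems | leetcode/roman_to_int.py | char_enumerate
-- ===== SOURCE A (Python) =====
-- from collections import Counter
--
-- def char_enumerate(s: str) -> int:
--     one = {'I': 1}
--     five = {'V': 5}
--     ten = {'X': 10}
--     fifty = {'L': 50}
--     hundred = {'C': 100}
--     five_hundred = {'D': 500}
--     thousand = {'M': 1000}
--     number = 0
--     occurences = Counter(s)
--     for pair in [one, five, ten, fifty, hundred, five_hundred, thousand]:
--         for key, value in pair.items():
--             if key in occurences.keys():
--                 number += occurences[key]*value
--     return number
-- ===== SOURCE B (Python) =====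
-- def _roman_value(ch: str) -> int:
--     if ch == 'I':
--         return 1
--     elif ch == 'V':
--         return 5
--     elif ch == 'X':
--         return 10
--     elif ch == 'L':
--         return 50
--     elif ch == 'C':
--         return 100
--     elif ch == 'D':
--         return 500
--     elif ch == 'M':
--         return 1000
--     else:
--         return 0
--
-- def char_enumerate(s: str) -> int:
--     return sum(map(_roman_value, s))
-- ===== Notes on version B (the rewrite author's own statement) =====
-- stated objective: simpler
-- what changed: Replaces the Counter build plus the loop over seven single-entry symbol dicts with a per-character value function (an if/elif chain, no dict or Counter at all) and sum(map(...)) over the string.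
import Mathlib
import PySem

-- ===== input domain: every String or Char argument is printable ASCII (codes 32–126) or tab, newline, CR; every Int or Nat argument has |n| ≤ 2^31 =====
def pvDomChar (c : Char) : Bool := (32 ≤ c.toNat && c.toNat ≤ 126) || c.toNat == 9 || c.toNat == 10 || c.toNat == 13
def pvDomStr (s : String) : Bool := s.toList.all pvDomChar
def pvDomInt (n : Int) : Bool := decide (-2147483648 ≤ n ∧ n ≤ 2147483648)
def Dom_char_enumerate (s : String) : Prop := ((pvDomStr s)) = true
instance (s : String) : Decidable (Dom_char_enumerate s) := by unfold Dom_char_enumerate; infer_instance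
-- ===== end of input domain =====

-- B replaces A's Counter-then-seven-dicts summation by a per-character value function
-- (an if/elif chain, no dict) summed over the string (objective: simpler).

-- ===== PORT A =====
-- A: build Counter(s), then loop over the seven single-entry symbol dicts,
-- adding count*value whenever the symbol occurs.
def char_enumerate (s : String) : Int :=
  let occurences := PySem.Dict.counter s.toList
  ([('I', (1:Int)), ('V', 5), ('X', 10), ('L', 50), ('C', 100), ('D', 500), ('M', 1000)]).foldl
    (fun number kv =>
      if occurences.contains kv.1 then number + occurences.getD kv.1 0 * kv.2 else number) 0

-- ===== PORT B =====
-- B: _roman_value is an if/elif chain; the total is sum(map(_roman_value, s)).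
def romanValue (ch : Char) : Int :=
  if ch = 'I' then 1
  else if ch = 'V' then 5
  else if ch = 'X' then 10
  else if ch = 'L' then 50
  else if ch = 'C' then 100
  else if ch = 'D' then 500
  else if ch = 'M' then 1000
  else 0

def char_enumerate_alt (s : String) : Int :=
  (s.toList.map romanValue).sum

-- ===== PRECONDITION & SPEC =====
def Spec_char_enumerate (s : String) (out : Int) : Prop := out = char_enumerate_alt s
instance (s : String) (out : Int) : Decidable (Spec_char_enumerate s out) := by unfold Spec_char_enumerate; infer_instance

-- ===== CLAIM (what is proved, stated in full; the proofs are below) =====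
def Claim_equal_char_enumerate : Prop := ∀ (s : String), Dom_char_enumerate s → Spec_char_enumerate s (char_enumerate s)

-- ===== LEMMAS AND PROOFS =====

-- closed form shared by both sides: weighted sum of the counts
def pvCountSum (l : List Char) : Int :=
  (l.count 'I' : Int) * 1 + (l.count 'V' : Int) * 5 + (l.count 'X' : Int) * 10 +
  (l.count 'L' : Int) * 50 + (l.count 'C' : Int) * 100 + (l.count 'D' : Int) * 500 +
  (l.count 'M' : Int) * 1000

lemma count_eq_zero_of_not_contains {l : List Char} {c : Char}
    (h : (PySem.Dict.counter l).contains c = false) : l.count c = 0 := by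
  have := PySem.Dict.getD_of_not_contains (d := PySem.Dict.counter l) (k := c) (d0 := (0:Int)) h
  rw [PySem.Dict.getD_counter] at this
  exact_mod_cast this

lemma counter_if_step (l : List Char) (c : Char) (n v : Int) :
    (if (PySem.Dict.counter l).contains c then
        n + (PySem.Dict.counter l).getD c 0 * v else n) = n + (l.count c : Int) * v := by
  by_cases h : (PySem.Dict.counter l).contains c
  · rw [if_pos h, PySem.Dict.getD_counter]
  · rw [if_neg h, count_eq_zero_of_not_contains (Bool.eq_false_iff.mpr h ▸ rfl)]
    push_cast; ring

lemma char_enumerate_eq_countSum (s : String) : char_enumerate s = pvCountSum (s.toList) := by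
  unfold char_enumerate pvCountSum
  simp only [List.foldl, counter_if_step]
  ring

lemma alt_sum_eq (l : List Char) : (l.map romanValue).sum = pvCountSum l := by
  induction l with
  | nil => simp [pvCountSum]
  | cons c l ih =>
    rw [List.map_cons, List.sum_cons, ih]
    simp only [pvCountSum, List.count_cons, romanValue]
    by_cases hI : c = 'I' <;> by_cases hV : c = 'V' <;> by_cases hX : c = 'X' <;>
    by_cases hL : c = 'L' <;> by_cases hC : c = 'C' <;> by_cases hD : c = 'D' <;>
    by_cases hM : c = 'M' <;> subst_vars <;> simp_all <;> ring

-- ===== VERDICT (by name: the statement is the Claim_ definition above) =====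
theorem char_enumerate_spec : Claim_equal_char_enumerate := by
  intro s _
  unfold Spec_char_enumerate char_enumerate_alt
  rw [char_enumerate_eq_countSum, alt_sum_eq]
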